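-- pv_equiv track=rewrite | github.com/nakayamaakinori0/2021_nakayama_research_program | RVLC_simulation/mylib/type_propeller.py | Modulate_offon
-- ===== SOURCE A (Python) =====
-- def Modulate_offon (LED_number,shifter):
--     all_data_list = []
--     # N個のLEDのDataのまとめ
--     LED_num = LED_number
--     for N in range (LED_num):
--         data_list = []
--         for D in range (360):
--             if D < shifter:
--                 data_list.append(1)
--             else:
--                 data_list.append(0)
--         all_data_list.append(data_list)
--     return all_data_list
-- ===== SOURCE B (Python) =====
-- def Modulate_offon(LED_number, shifter):
--     n = max(LED_number, 0)
--     flat = [int(i % 360 < shifter) for i in range(n * 360)]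
--     return [flat[j * 360:(j + 1) * 360] for j in range(n)]
-- ===== Notes on version B (the rewrite author's own statement) =====
-- stated objective: alternative
-- what changed: Replaces the nested per-row/per-element loops by one flat pass that computes all LED_number*360 on/off values from the position's residue mod 360, then slices the flat buffer into the rows.
import Mathlib
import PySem

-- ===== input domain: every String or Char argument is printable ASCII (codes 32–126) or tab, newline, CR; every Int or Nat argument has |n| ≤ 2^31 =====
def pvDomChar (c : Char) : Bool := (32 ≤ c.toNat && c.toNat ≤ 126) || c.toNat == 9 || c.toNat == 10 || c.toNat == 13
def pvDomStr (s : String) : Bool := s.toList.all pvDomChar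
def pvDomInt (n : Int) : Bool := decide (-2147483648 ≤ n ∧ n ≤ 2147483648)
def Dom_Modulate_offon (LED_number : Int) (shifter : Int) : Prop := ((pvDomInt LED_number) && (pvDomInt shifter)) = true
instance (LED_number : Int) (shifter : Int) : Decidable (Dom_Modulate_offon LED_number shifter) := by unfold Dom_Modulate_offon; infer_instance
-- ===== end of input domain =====

-- B replaces A's nested row-by-row, element-by-element loops by ONE flat pass
-- over all n*360 positions (the on/off value read off the position's residue
-- mod 360), then slices that flat buffer into the n rows (objective: alternative).

-- ===== PORT A =====
def Modulate_offon (LED_number : Int) (shifter : Int) : List (List Int) :=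
  (PySem.List.pyRange 0 LED_number 1).foldl
    (fun all_data_list _N =>
      all_data_list ++
        [(PySem.List.pyRange 0 360 1).foldl
          (fun data_list D => if D < shifter then data_list ++ [1] else data_list ++ [0]) []])
    []

-- ===== PORT B =====
def Modulate_offon_alt (LED_number : Int) (shifter : Int) : List (List Int) :=
  let n : Int := max LED_number 0
  let flat : List Int :=
    (PySem.List.pyRange 0 (n * 360) 1).map
      (fun i => if PySem.Int.mod i 360 < shifter then (1 : Int) else 0)
  (PySem.List.pyRange 0 n 1).map
    (fun j => PySem.List.slice flat (some (j * 360)) (some ((j + 1) * 360)))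

-- ===== PRECONDITION & SPEC =====
def Spec_Modulate_offon (LED_number : Int) (shifter : Int) (out : List (List Int)) : Prop := out = Modulate_offon_alt LED_number shifter
instance (LED_number : Int) (shifter : Int) (out : List (List Int)) : Decidable (Spec_Modulate_offon LED_number shifter out) := by unfold Spec_Modulate_offon; infer_instance

-- ===== CLAIM (what is proved, stated in full; the proofs are below) =====
def Claim_equal_Modulate_offon : Prop := ∀ (LED_number : Int) (shifter : Int), Dom_Modulate_offon LED_number shifter → Spec_Modulate_offon LED_number shifter (Modulate_offon LED_number shifter)

-- ===== LEMMAS AND PROOFS =====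

-- A's inner loop as a map (branch pushed into the appended element)
theorem pv_inner_fold_eq_map (s : Int) (l : List Int) (acc : List Int) :
    l.foldl (fun data_list D => if D < s then data_list ++ [1] else data_list ++ [0]) acc
    = acc ++ l.map (fun D => if D < s then (1 : Int) else 0) := by
  induction l generalizing acc with
  | nil => simp
  | cons x xs ih =>
    by_cases h : x < s <;> simp [h, ih, List.append_assoc]

-- range(a, a+n) is range(0, n) shifted by a
theorem pv_pyRange_shift (a : Int) (n : Nat) :
    PySem.List.pyRange a (a + (n : Int)) 1
    = (PySem.List.pyRange 0 (n : Int) 1).map (fun k => a + k) := by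
  induction n with
  | zero =>
    have h1 : a + ((0 : Nat) : Int) = a := by norm_num
    rw [h1, PySem.List.pyRange_one_eq_nil le_rfl,
        PySem.List.pyRange_one_eq_nil (by norm_num)]
    simp
  | succ n ih =>
    have h1 : a + ((n + 1 : Nat) : Int) = (a + (n : Int)) + 1 := by push_cast; ring
    have h2 : ((n + 1 : Nat) : Int) = (n : Int) + 1 := by push_cast; ring
    rw [h1, h2, PySem.List.pyRange_one_succ_right (by omega : a ≤ a + (n : Int)),
        PySem.List.pyRange_one_succ_right (Int.natCast_nonneg n), List.map_append, ih]
    simp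

-- B's flat buffer is m copies of A's row, laid end to end
theorem pv_flat_chunks (s : Int) (m : Nat) :
    (PySem.List.pyRange 0 ((m : Int) * 360) 1).map
        (fun i => if PySem.Int.mod i 360 < s then (1 : Int) else 0)
    = (List.replicate m ((PySem.List.pyRange 0 360 1).map
        (fun D => if D < s then (1 : Int) else 0))).flatten := by
  induction m with
  | zero => simp
  | succ m ih =>
    have hsplit : PySem.List.pyRange 0 (((m + 1 : Nat) : Int) * 360) 1
        = PySem.List.pyRange 0 ((m : Int) * 360) 1
          ++ PySem.List.pyRange ((m : Int) * 360) (((m + 1 : Nat) : Int) * 360) 1 := by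
      apply PySem.List.pyRange_one_append <;> push_cast <;> nlinarith [Int.natCast_nonneg m]
    rw [hsplit, List.map_append, ih, List.replicate_succ', List.flatten_append]
    congr 1
    have h360 : (((m + 1 : Nat) : Int) * 360) = (m : Int) * 360 + ((360 : Nat) : Int) := by
      push_cast; ring
    rw [h360, pv_pyRange_shift, List.map_map]
    simp only [List.flatten_cons, List.flatten_nil, List.append_nil]
    have hcast : ((360 : Nat) : Int) = (360 : Int) := by norm_num
    rw [hcast]
    apply List.map_congr_left
    intro k hk
    obtain ⟨hk0, hk1⟩ := PySem.List.mem_pyRange_one.mp hk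
    show (if PySem.Int.mod ((m : Int) * 360 + k) 360 < s then (1 : Int) else 0)
        = if k < s then (1 : Int) else 0
    rw [PySem.Int.mod_eq_emod_of_pos (by norm_num : (0:Int) < 360)]
    have hk2 : ((m : Int) * 360 + k) % 360 = k := by omega
    rw [hk2]

-- slicing the j-th 360-chunk out of end-to-end copies of a length-360 row
theorem pv_chunk_extract (r : List Int) (hr : r.length = 360) :
    ∀ (jn m : Nat), jn < m →
      (((List.replicate m r).flatten.drop (jn * 360)).take 360) = r := by
  intro jn
  induction jn with
  | zero =>
    intro m hm
    obtain ⟨m', rfl⟩ := Nat.exists_eq_succ_of_ne_zero (by omega : m ≠ 0)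
    simp [List.replicate_succ, List.take_left' hr]
  | succ jn ih =>
    intro m hm
    obtain ⟨m', rfl⟩ := Nat.exists_eq_succ_of_ne_zero (by omega : m ≠ 0)
    rw [List.replicate_succ, List.flatten_cons]
    have ha : (jn + 1) * 360 = r.length + jn * 360 := by omega
    have hb : r.length + jn * 360 - r.length = jn * 360 := by omega
    rw [ha, List.drop_append, List.drop_eq_nil_of_le (by omega), hb, List.nil_append]
    exact ih m' (by omega)

-- ===== VERDICT (by name: the statement is the Claim_ definition above) =====
theorem Modulate_offon_spec : Claim_equal_Modulate_offon := by
  intro L s _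
  unfold Spec_Modulate_offon Modulate_offon Modulate_offon_alt
  set rowA : List Int :=
    (PySem.List.pyRange 0 360 1).map (fun D => if D < s then (1 : Int) else 0) with hrow
  have hrange : PySem.List.pyRange 0 L 1 = PySem.List.pyRange 0 (max L 0) 1 := by
    rcases le_or_gt L 0 with h | h
    · rw [PySem.List.pyRange_one_eq_nil h, PySem.List.pyRange_one_eq_nil (by omega)]
    · congr 1; omega
  have hA : (PySem.List.pyRange 0 L 1).foldl
      (fun all_data_list _N =>
        all_data_list ++
          [(PySem.List.pyRange 0 360 1).foldl
            (fun data_list D => if D < s then data_list ++ [1] else data_list ++ [0]) []])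
      [] = (PySem.List.pyRange 0 (max L 0) 1).map (fun _ => rowA) := by
    rw [hrange, PySem.List.foldl_append_singleton_eq_map]
    apply List.map_congr_left
    intro j _
    rw [pv_inner_fold_eq_map, List.nil_append]
  rw [hA]
  set n : Int := max L 0 with hn
  have hn0 : 0 ≤ n := by omega
  obtain ⟨m, hm⟩ : ∃ m : Nat, n = (m : Int) := ⟨n.toNat, (Int.toNat_of_nonneg hn0).symm⟩
  have hflat := pv_flat_chunks s m
  have hrlen : rowA.length = 360 := by
    rw [hrow, List.length_map, PySem.List.length_pyRange_one]; rfl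
  apply List.map_congr_left
  intro j hj
  obtain ⟨hj0, hjn⟩ := (PySem.List.mem_pyRange_one).mp hj
  obtain ⟨jn, rfl⟩ : ∃ jn : Nat, j = (jn : Int) := ⟨j.toNat, (Int.toNat_of_nonneg hj0).symm⟩
  have hjm : jn < m := by omega
  have hcast1 : ((jn : Int) * 360) = ((jn * 360 : Nat) : Int) := by push_cast; ring
  have hcast2 : (((jn : Int) + 1) * 360) = ((jn * 360 : Nat) : Int) + ((360 : Nat) : Int) := by
    push_cast; ring
  rw [hm, hflat, hcast1, hcast2, PySem.List.slice_natCast_add, ← hrow]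
  exact (pv_chunk_extract rowA hrlen jn m hjm).symm
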